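-- pv_equiv track=rewrite | github.com/TheCyberLocal/STRling | bindings/cpp/tooling/no_public_pointers.py | hits_in_text
-- ===== SOURCE A (Python) =====
-- from typing import Iterable, List, Tuple, Dict, Union
--
-- def hits_in_text(text: str, tokens: Iterable[str]) -> List[Tuple[int, str, str]]:
--     """Return a list of (line_number, token, line) occurrences found in text.
--
--     Parameters
--     - text: full string to scan
--     - tokens: iterable of substring tokens to search for
--
--     Returns a list of tuples: (line_number, token, matched_line)
--     """
--     hits: List[Tuple[int, str, str]] = []
--     lines = text.splitlines()
--     for i, line in enumerate(lines, start=1):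
--         for token in tokens:
--             if token in line:
--                 hits.append((i, token, line.strip()))
--     return hits
-- ===== SOURCE B (Python) =====
-- def hits_in_text(text, tokens):
--     """Token-major scan, then a stable sort by line number restores A's line-major order."""
--     lines = text.splitlines()
--     toks = list(tokens)
--     per_token = [(i, tok, line.strip())
--                  for tok in toks
--                  for i, line in enumerate(lines, 1)
--                  if tok in line]
--     return sorted(per_token, key=lambda h: h[0])
-- ===== Notes on version B (the rewrite author's own statement) =====
-- stated objective: alternative
-- what changed: A scans line-major with an inner token loop appending as it goes; B scans token-major (one comprehension per token over the lines) and restores A's line-major order with a stable sort by line number.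
import Mathlib
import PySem

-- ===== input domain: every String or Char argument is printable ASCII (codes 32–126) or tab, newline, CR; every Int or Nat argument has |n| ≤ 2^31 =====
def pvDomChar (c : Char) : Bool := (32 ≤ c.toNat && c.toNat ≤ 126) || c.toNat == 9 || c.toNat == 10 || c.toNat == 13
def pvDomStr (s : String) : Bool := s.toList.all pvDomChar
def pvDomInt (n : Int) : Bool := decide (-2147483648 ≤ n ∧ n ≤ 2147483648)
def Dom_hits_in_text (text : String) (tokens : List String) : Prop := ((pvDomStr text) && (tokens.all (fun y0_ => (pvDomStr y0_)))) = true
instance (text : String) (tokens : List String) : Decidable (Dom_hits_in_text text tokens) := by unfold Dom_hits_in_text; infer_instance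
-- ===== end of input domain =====

-- B re-implements the scan token-major (one comprehension per token over the lines) and
-- restores A's line-major output order with a stable sort by line number; objective: alternative (same cost).

-- ===== PORT A =====
def hits_in_text (text : String) (tokens : List String) : List (Int × String × String) :=
  let lines := PySem.Str.splitlines text
  (PySem.List.enumerate lines 1).foldl
    (fun hits p =>
      tokens.foldl
        (fun hits token =>
          if PySem.Str.isIn token p.2 then hits ++ [(p.1, token, PySem.Str.strip p.2)] else hits)
        hits)
    []

-- ===== PORT B =====
def hits_in_text_alt (text : String) (tokens : List String) : List (Int × String × String) :=
  let lines := PySem.Str.splitlines text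
  let perToken : List (Int × String × String) :=
    tokens.flatMap (fun tok =>
      (PySem.List.enumerate lines 1).filterMap (fun p =>
        if PySem.Str.isIn tok p.2 then some (p.1, tok, PySem.Str.strip p.2) else none))
  PySem.List.sorted perToken (fun h => h.1) false

-- ===== PRECONDITION & SPEC =====
def Spec_hits_in_text (text : String) (tokens : List String) (out : List (Int × String × String)) : Prop := out = hits_in_text_alt text tokens
instance (text : String) (tokens : List String) (out : List (Int × String × String)) : Decidable (Spec_hits_in_text text tokens out) := by unfold Spec_hits_in_text; infer_instance

-- ===== CLAIM (what is proved, stated in full; the proofs are below) =====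
def Claim_equal_hits_in_text : Prop := ∀ (text : String) (tokens : List String), Dom_hits_in_text text tokens → Spec_hits_in_text text tokens (hits_in_text text tokens)

-- ===== LEMMAS AND PROOFS =====

-- insertBy walks past a prefix it is not inserted into
lemma pvInsertBy_append_left {β : Type} (before : β → β → Bool) (x : β) (P Q : List β)
    (hP : ∀ y ∈ P, before x y = false) :
    PySem.List.insertBy before x (P ++ Q) = P ++ PySem.List.insertBy before x Q := by
  induction P with
  | nil => simp
  | cons p ps ih =>
    simp only [List.cons_append, PySem.List.insertBy, hP p (by simp)]
    simp only [Bool.false_eq_true, if_false]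
    exact congrArg (p :: ·) (ih (fun y hy => hP y (by simp [hy])))

-- insertBy between a "not-before" prefix and a "before" suffix
lemma pvInsertBy_append {β : Type} (before : β → β → Bool) (x : β) (P Q : List β)
    (hP : ∀ y ∈ P, before x y = false) (hQ : ∀ y ∈ Q, before x y = true) :
    PySem.List.insertBy before x (P ++ Q) = P ++ x :: Q := by
  rw [pvInsertBy_append_left before x P Q hP]
  cases Q with
  | nil => simp [PySem.List.insertBy]
  | cons q qs => simp [PySem.List.insertBy, hQ q (by simp)]

-- inserting an element into a concatenation of strictly key-increasing buckets appends it to its own bucket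
lemma pvInsertBy_flatMap {β : Type} (key : β → Int) (ks : List Int) (g : Int → List β)
    (hks : ks.Pairwise (· < ·)) (hg : ∀ k, ∀ y ∈ g k, key y = k) (x : β) (hmem : key x ∈ ks) :
    PySem.List.insertBy (fun a b => decide (key a < key b)) x (ks.flatMap g)
      = ks.flatMap (fun k' => if k' = key x then g k' ++ [x] else g k') := by
  induction ks with
  | nil => simp at hmem
  | cons k₀ rest ih =>
    rw [List.flatMap_cons, List.flatMap_cons]
    rcases List.pairwise_cons.mp hks with ⟨hlt, hrest⟩
    by_cases h0 : k₀ = key x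
    · have hP : ∀ y ∈ g k₀, (decide (key x < key y)) = false := by
        intro y hy; have := hg k₀ y hy; simp [this, h0]
      have hQ : ∀ y ∈ rest.flatMap g, (decide (key x < key y)) = true := by
        intro y hy
        rcases List.mem_flatMap.mp hy with ⟨k', hk', hy'⟩
        have := hg k' y hy'
        have := hlt k' hk'
        simp_all
      rw [pvInsertBy_append _ x _ _ hP hQ]
      have hrest' : rest.flatMap (fun k' => if k' = key x then g k' ++ [x] else g k') = rest.flatMap g := by
        apply List.flatMap_congr
        intro k' hk'
        have : k' ≠ key x := by have := hlt k' hk'; omega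
        simp [this]
      rw [hrest']
      simp [h0]
    · have hx' : key x ∈ rest := by
        rcases List.mem_cons.mp hmem with h | h
        · exact absurd h.symm h0
        · exact h
      have hP : ∀ y ∈ g k₀, (decide (key x < key y)) = false := by
        intro y hy
        have hy' := hg k₀ y hy
        have := hlt (key x) hx'
        simp [hy']; omega
      rw [pvInsertBy_append_left _ x _ _ hP, ih hrest hx']
      simp [h0]

-- stable sort as bucket concatenation: sorting by an Int key whose values all lie in the
-- strictly increasing list ks concatenates, per key, the elements in their original order
lemma pvSortedBuckets {β : Type} (key : β → Int) (xs : List β) (ks : List Int)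
    (hks : ks.Pairwise (· < ·)) (hmem : ∀ x ∈ xs, key x ∈ ks) :
    PySem.List.sorted xs key false = ks.flatMap (fun k => xs.filter (fun x => key x == k)) := by
  induction xs using List.reverseRecOn with
  | nil => simp [PySem.List.sorted]
  | append_singleton xs x ih =>
    rw [PySem.List.sorted_eq_foldl_insertBy, List.foldl_append, List.foldl_cons, List.foldl_nil,
        ← PySem.List.sorted_eq_foldl_insertBy,
        ih (fun y hy => hmem y (List.mem_append_left _ hy))]
    rw [pvInsertBy_flatMap key ks _ hks
        (fun k y hy => by simpa using (List.mem_filter.mp hy).2)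
        x (hmem x (by simp))]
    apply List.flatMap_congr
    intro k' _
    rw [List.filter_append]
    by_cases h : k' = key x
    · simp [h]
    · have hne : (key x == k') = false := by simp; exact fun hh => h hh.symm
      simp [h, hne]

-- a comprehension with a test is filter-then-map (filterMap form)
lemma pvFilterMap_if {β γ : Type} (p : β → Bool) (f : β → γ) (l : List β) :
    l.filterMap (fun x => if p x then some (f x) else none) = (l.filter p).map f := by
  induction l with
  | nil => rfl
  | cons a l ih => by_cases h : p a <;> simp [h, ih]

-- a flatMap of conditional singletons is filter-then-map
lemma pvFlatMap_if {β γ : Type} (p : β → Bool) (f : β → γ) (l : List β) :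
    l.flatMap (fun x => if p x then [f x] else []) = (l.filter p).map f := by
  induction l with
  | nil => rfl
  | cons a l ih => by_cases h : p a <;> simp [h, ih]

-- in a list with strictly increasing first components, filtering on one member's key keeps exactly it
lemma pvFilterFstEq {γ : Type} (E : List (Int × γ)) (hE : E.Pairwise (fun a b => a.1 < b.1))
    (p₀ : Int × γ) (hp : p₀ ∈ E) :
    E.filter (fun p => p.1 == p₀.1) = [p₀] := by
  induction E with
  | nil => simp at hp
  | cons e E' ih =>
    rcases List.pairwise_cons.mp hE with ⟨hlt, hE'⟩
    rcases List.mem_cons.mp hp with h | h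
    · subst h
      have hnil : E'.filter (fun p => p.1 == p₀.1) = [] := by
        apply List.filter_eq_nil_iff.mpr
        intro p hp'
        have := hlt p hp'
        simp only [beq_iff_eq]
        omega
      simp [hnil]
    · have hne : (e.1 == p₀.1) = false := by
        have := hlt p₀ h
        simp; omega
      simp [hne, ih hE' h]

-- the bucket of one line inside the token-major hit list is exactly A's block for that line
lemma pvLineBucket (tokens : List String) (E : List (Int × String))
    (hE : E.Pairwise (fun a b => a.1 < b.1)) (p₀ : Int × String) (hp : p₀ ∈ E) :
    (tokens.flatMap (fun t =>
        (E.filter (fun p => PySem.Str.isIn t p.2)).map (fun p => (p.1, t, PySem.Str.strip p.2)))).filter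
      (fun h => h.1 == p₀.1)
    = (tokens.filter (fun t => PySem.Str.isIn t p₀.2)).map (fun t => (p₀.1, t, PySem.Str.strip p₀.2)) := by
  rw [← pvFlatMap_if (fun t => PySem.Str.isIn t p₀.2) (fun t => (p₀.1, t, PySem.Str.strip p₀.2)) tokens]
  rw [List.filter_flatMap]
  apply List.flatMap_congr
  intro t _
  rw [List.filter_map]
  have hcomm : (E.filter (fun p => PySem.Str.isIn t p.2)).filter ((fun h => h.1 == p₀.1) ∘ (fun p => (p.1, t, PySem.Str.strip p.2)))
      = (E.filter (fun p => p.1 == p₀.1)).filter (fun p => PySem.Str.isIn t p.2) := by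
    simp only [List.filter_filter]
    apply List.filter_congr
    intro p _
    simp [Bool.and_comm]
  rw [hcomm, pvFilterFstEq E hE p₀ hp]
  by_cases h : PySem.Chars.isIn t.toList p₀.2.toList <;> simp [PySem.Str.isIn, h]

-- the two ports agree on every input
lemma pv_main (text : String) (tokens : List String) :
    hits_in_text text tokens = hits_in_text_alt text tokens := by
  unfold hits_in_text hits_in_text_alt
  simp only []
  set lines := PySem.Str.splitlines text with hl
  set E := PySem.List.enumerate lines 1 with hEdef
  have hE : E.Pairwise (fun a b => a.1 < b.1) := PySem.List.pairwise_lt_enumerate lines 1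
  -- A-side: nested foldl with appends is a line-major flatMap
  have hA : E.foldl
      (fun hits p =>
        tokens.foldl
          (fun hits token =>
            if PySem.Str.isIn token p.2 then hits ++ [(p.1, token, PySem.Str.strip p.2)] else hits)
          hits) []
      = E.flatMap (fun p => (tokens.filter (fun t => PySem.Str.isIn t p.2)).map
          (fun t => (p.1, t, PySem.Str.strip p.2))) := by
    have step : (fun (hits : List (Int × String × String)) (p : Int × String) =>
        tokens.foldl
          (fun hits token =>
            if PySem.Str.isIn token p.2 then hits ++ [(p.1, token, PySem.Str.strip p.2)] else hits)
          hits)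
        = fun hits p => hits ++ (tokens.filter (fun t => PySem.Str.isIn t p.2)).map
            (fun t => (p.1, t, PySem.Str.strip p.2)) := by
      funext hits p
      exact PySem.List.foldl_append_if _ _ _ _
    rw [step]
    simpa using PySem.List.foldl_append_eq_flatMap _ _ ([])
  rw [hA]
  -- B-side: the comprehension is filter-then-map, then the stable sort is bucket concatenation
  have hB : tokens.flatMap (fun tok =>
        E.filterMap (fun p =>
          if PySem.Str.isIn tok p.2 then some (p.1, tok, PySem.Str.strip p.2) else none))
      = tokens.flatMap (fun t =>
          (E.filter (fun p => PySem.Str.isIn t p.2)).map (fun p => (p.1, t, PySem.Str.strip p.2))) := by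
    apply List.flatMap_congr
    intro t _
    exact pvFilterMap_if _ _ _
  rw [hB]
  set T := tokens.flatMap (fun t =>
      (E.filter (fun p => PySem.Str.isIn t p.2)).map (fun p => (p.1, t, PySem.Str.strip p.2))) with hT
  have hmem : ∀ x ∈ T, x.1 ∈ E.map (·.1) := by
    intro x hx
    rcases List.mem_flatMap.mp hx with ⟨t, _, hx'⟩
    rcases List.mem_map.mp hx' with ⟨p, hp, rfl⟩
    exact List.mem_map.mpr ⟨p, List.mem_of_mem_filter hp, rfl⟩
  have hks : (E.map (·.1)).Pairwise (· < ·) := List.pairwise_map.mpr hE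
  rw [pvSortedBuckets (fun h => h.1) T (E.map (·.1)) hks hmem]
  rw [List.flatMap_map]
  apply List.flatMap_congr
  intro p hp
  exact (pvLineBucket tokens E hE p hp).symm

-- ===== VERDICT (by name: the statement is the Claim_ definition above) =====
theorem hits_in_text_spec : Claim_equal_hits_in_text := by
  intro text tokens _
  unfold Spec_hits_in_text
  exact pv_main text tokens
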